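-- pv_equiv track=rewrite | github.com/chboishabba/SensibLaw | src/ontology/wikidata_disjointness.py | _ancestor_distances
-- ===== SOURCE A (Python) =====
-- from typing import Any, Mapping
--
-- def _ancestor_distances(graph: Mapping[str, set[str]], start: str) -> dict[str, int]:
--     distances = {start: 0}
--     frontier = [start]
--     while frontier:
--         node = frontier.pop(0)
--         for parent in sorted(graph.get(node, set())):
--             next_distance = distances[node] + 1
--             previous = distances.get(parent)
--             if previous is not None and previous <= next_distance:
--                 continue
--             distances[parent] = next_distance
--             frontier.append(parent)
--     return distances
-- ===== SOURCE B (Python) =====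
-- def _ancestor_distances(graph, start):
--     visited = {start}
--     frontier = [start]
--     levels = []
--     while frontier:
--         levels.append(frontier)
--         nxt = []
--         for node in frontier:
--             for parent in sorted(graph.get(node, set())):
--                 if parent not in visited:
--                     visited.add(parent)
--                     nxt.append(parent)
--         frontier = nxt
--     return {node: d for d, level in enumerate(levels) for node in level}
-- ===== Notes on version B (the rewrite author's own statement) =====
-- stated objective: alternative
-- what changed: B drops A's relax-and-requeue single queue (frontier.pop(0) plus a per-edge distance-comparison relaxation test against a dict maintained during the traversal) and instead expands whole frontiers level by level against a plain visited set, assembling the distances dict only at the end from the enumerated levels.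
import Mathlib
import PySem

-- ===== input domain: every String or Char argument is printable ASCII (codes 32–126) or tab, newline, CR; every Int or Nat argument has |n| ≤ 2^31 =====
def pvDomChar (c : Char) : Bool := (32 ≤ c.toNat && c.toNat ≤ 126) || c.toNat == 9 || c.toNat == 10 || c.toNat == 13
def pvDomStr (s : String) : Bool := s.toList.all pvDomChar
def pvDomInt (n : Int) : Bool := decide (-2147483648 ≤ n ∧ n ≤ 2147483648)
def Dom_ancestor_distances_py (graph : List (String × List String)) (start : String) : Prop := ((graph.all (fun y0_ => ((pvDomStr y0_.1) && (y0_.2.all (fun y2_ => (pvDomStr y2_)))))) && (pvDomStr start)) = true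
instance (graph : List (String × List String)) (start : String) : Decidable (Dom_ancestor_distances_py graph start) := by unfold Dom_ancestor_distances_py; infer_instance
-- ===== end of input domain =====

-- B replaces A's single relax-and-requeue queue (frontier.pop(0), per-edge distance comparison,
-- distances dict maintained during the traversal) by level-synchronous frontier expansion: whole
-- levels are expanded at once against a plain visited set, and the distances dict is assembled
-- only afterwards from the enumerated levels; proved to return the identical dict.

-- ===== PORT A =====
-- graph.get(node, set()) : first-match association-list lookup, default empty
def pvAdj (graph : List (String × List String)) (node : String) : List String :=
  ((PySem.Dict.mk graph).get? node).getD []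

-- fuel bound: the loop pops 1 + (#appends) times; every append inserts a fresh key that occurs in
-- some adjacency list, so pops ≤ 1 + Σ|adj|; fuel Σ|adj| + 2 is always enough.
def pvFuel (graph : List (String × List String)) : Nat :=
  (graph.map (fun kv => kv.2.length)).sum + 2

-- body of A's inner for-loop: next_distance recomputed each iteration, relax-or-skip
def pvStepA (node : String) (s : PySem.Dict String Int × List String) (parent : String) :
    PySem.Dict String Int × List String :=
  let nd := (s.1.get? node).getD 0 + 1   -- distances[node] + 1 (KeyError unreachable: queued ⇒ key)
  match s.1.get? parent with
  | some prev => if prev ≤ nd then s else (s.1.insert parent nd, s.2 ++ [parent])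
  | none => (s.1.insert parent nd, s.2 ++ [parent])

def pvALoop (graph : List (String × List String)) :
    Nat → PySem.Dict String Int → List String → PySem.Dict String Int
  | 0, dist, _ => dist
  | _ + 1, dist, [] => dist
  | fuel + 1, dist, node :: rest =>
      let s := (PySem.List.sorted (pvAdj graph node) (fun x => x) false).foldl
                 (pvStepA node) (dist, rest)
      pvALoop graph fuel s.1 s.2

def ancestor_distances_py (graph : List (String × List String)) (start : String) :
    List (String × Int) :=
  (pvALoop graph (pvFuel graph) (PySem.Dict.empty.insert start 0) [start]).items

-- ===== PORT B =====
-- innermost loop body: 'if parent not in visited: visited.add(parent); nxt.append(parent)'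
def pvStepC (s : PySem.Set String × List String) (parent : String) :
    PySem.Set String × List String :=
  if s.1.contains parent then s else (PySem.Set.add s.1 parent, s.2 ++ [parent])

-- one node of the current level: 'for parent in sorted(graph.get(node, set())): …'
def pvLevelStep (graph : List (String × List String))
    (s : PySem.Set String × List String) (node : String) :
    PySem.Set String × List String :=
  (PySem.List.sorted (pvAdj graph node) (fun x => x) false).foldl pvStepC s

-- 'while frontier: levels.append(frontier); … frontier = nxt' (fuel as for A: ≤ Σ|adj|+1 levels)
def pvBLevels (graph : List (String × List String)) :
    Nat → PySem.Set String → List String → List (List String)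
  | 0, _, _ => []
  | _ + 1, _, [] => []
  | fuel + 1, visited, node :: rest =>
      let s := (node :: rest).foldl (pvLevelStep graph) (visited, ([] : List String))
      (node :: rest) :: pvBLevels graph fuel s.1 s.2

-- '{node: d for d, level in enumerate(levels) for node in level}'
def ancestor_distances_py_alt (graph : List (String × List String)) (start : String) :
    List (String × Int) :=
  ((PySem.List.enumerate (pvBLevels graph (pvFuel graph) (PySem.Set.ofList [start]) [start]) 0).foldl
      (fun d p => p.2.foldl (fun d node => d.insert node p.1) d)
      (PySem.Dict.empty : PySem.Dict String Int)).items

-- ===== PRECONDITION & SPEC =====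
def Spec_ancestor_distances_py (graph : List (String × List String)) (start : String) (out : List (String × Int)) : Prop := out = ancestor_distances_py_alt graph start
instance (graph : List (String × List String)) (start : String) (out : List (String × Int)) : Decidable (Spec_ancestor_distances_py graph start out) := by unfold Spec_ancestor_distances_py; infer_instance

-- ===== CLAIM (what is proved, stated in full; the proofs are below) =====
def Claim_equal_ancestor_distances_py : Prop := ∀ (graph : List (String × List String)) (start : String), Dom_ancestor_distances_py graph start → Spec_ancestor_distances_py graph start (ancestor_distances_py graph start)

-- ===== LEMMAS AND PROOFS =====

-- proof-side view of B's final dict comprehension: insert the levels with distances d, d+1, …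
def insLevels : List (List String) → Int → PySem.Dict String Int → PySem.Dict String Int
  | [], _, D => D
  | L :: Ls, d, D => insLevels Ls (d + 1) (L.foldl (fun D x => D.insert x d) D)

theorem pv_enum_fold (Ls : List (List String)) : ∀ (i : Int) (D : PySem.Dict String Int),
    (PySem.List.enumerate Ls i).foldl
      (fun d p => p.2.foldl (fun d node => d.insert node p.1) d) D = insLevels Ls i D := by
  induction Ls with
  | nil => intro i D; simp [PySem.List.enumerate_nil, insLevels]
  | cons L Ls ih => intro i D; rw [PySem.List.enumerate_cons]; simpa [insLevels] using ih (i+1) _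

theorem pvBLevels_nil (graph : List (String × List String)) (f : Nat) (V : PySem.Set String) :
    pvBLevels graph f V [] = [] := by cases f <;> rfl

-- re-inserting an existing binding with its own value is a no-op
theorem pv_insert_eq_self (d : PySem.Dict String Int) (k : String) (v : Int)
    (hnd : d.keys.Nodup) (h : d.get? k = some v) : d.insert k v = d := by
  apply PySem.Dict.ext
  have hc : d.contains k = true := by rw [PySem.Dict.contains_eq_isSome_get?, h]; rfl
  rw [PySem.Dict.items_insert, if_pos hc]
  conv_rhs => rw [← List.map_id d.items]
  apply List.map_congr_left
  rintro ⟨p1, p2⟩ hp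
  by_cases hk : p1 = k
  · subst hk
    have h2 : d.get? p1 = some p2 := PySem.Dict.get?_of_mem_items _ hp hnd
    rw [h] at h2
    have hv : v = p2 := by injection h2
    subst hv
    simp
  · simp [hk]

theorem pv_reinsert (L : List String) (d : Int) : ∀ (dist : PySem.Dict String Int),
    dist.keys.Nodup → (∀ x ∈ L, dist.get? x = some d) →
    L.foldl (fun D x => D.insert x d) dist = dist := by
  induction L with
  | nil => intro dist _ _; rfl
  | cons a L ih =>
      intro dist hnd h
      simp only [List.foldl_cons, pv_insert_eq_self dist a d hnd (h a (by simp))]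
      exact ih dist hnd (fun x hx => h x (by simp [hx]))

theorem pv_get?_foldl_insert (L : List String) (v : Int) :
    ∀ (D : PySem.Dict String Int) (y : String),
    (L.foldl (fun D x => D.insert x v) D).get? y = if y ∈ L then some v else D.get? y := by
  induction L with
  | nil => intro D y; simp
  | cons a L ih =>
      intro D y
      simp only [List.foldl_cons, ih, PySem.Dict.get?_insert]
      by_cases hy : y ∈ L <;> by_cases hya : y = a <;> simp [hy, hya]

theorem pv_contains_foldl_insert (L : List String) (v : Int) (D : PySem.Dict String Int)
    (y : String) :
    (L.foldl (fun D x => D.insert x v) D).contains y = (decide (y ∈ L) || D.contains y) := by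
  rw [PySem.Dict.contains_eq_isSome_get?, pv_get?_foldl_insert,
    PySem.Dict.contains_eq_isSome_get?]
  by_cases hy : y ∈ L <;> simp [hy]

theorem pv_contains_add (s : PySem.Set String) (a x : String) :
    PySem.Set.contains (PySem.Set.add s a) x = (PySem.Set.contains s x || x == a) := by
  unfold PySem.Set.add
  by_cases h : PySem.Set.contains s a
  · rw [if_pos h]
    by_cases hx : x = a
    · subst hx; rw [h]; simp
    · simp [hx]
  · rw [if_neg h]
    show List.contains (s ++ [a]) x = (List.contains s x || x == a)
    rw [Bool.eq_iff_iff]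
    simp [Or.comm]

theorem pv_contains_foldl_add (L : List String) : ∀ (V : PySem.Set String) (y : String),
    PySem.Set.contains (L.foldl PySem.Set.add V) y =
      (decide (y ∈ L) || PySem.Set.contains V y) := by
  induction L with
  | nil => intro V y; simp
  | cons a L ih =>
      intro V y
      simp only [List.foldl_cons, ih, pv_contains_add]
      by_cases hy : y ∈ L <;> by_cases hya : y = a <;> simp [hy, hya]

-- adjacency values come from the flattened right-hand sides of graph
theorem pv_adj_sub (graph : List (String × List String)) (node x : String)
    (h : x ∈ pvAdj graph node) : x ∈ graph.flatMap (fun kv => kv.2) := by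
  induction graph with
  | nil => simp [pvAdj, PySem.Dict.get?] at h
  | cons kv rest ih =>
      unfold pvAdj at h
      rw [show PySem.Dict.mk (kv :: rest) = PySem.Dict.mk ((kv.1, kv.2) :: rest) by rfl,
        PySem.Dict.get?_mk_cons] at h
      by_cases hk : (kv.1 == node) = true
      · rw [if_pos hk] at h
        simp only [Option.getD_some] at h
        exact List.mem_flatMap.mpr ⟨kv, by simp, h⟩
      · rw [if_neg hk] at h
        simp only [List.flatMap_cons, List.mem_append]
        exact Or.inr (ih h)

-- the undiscovered-candidate count, the termination measure shared by both loops
def pvCands (graph : List (String × List String)) : List String :=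
  PySem.Set.ofList (graph.flatMap (fun kv => kv.2))

def pvUndisc (graph : List (String × List String)) (dist : PySem.Dict String Int) : Nat :=
  ((pvCands graph).filter (fun x => !dist.contains x)).length

theorem pv_filter_drop (p q : String → Bool) (a : String)
    (hq : ∀ x, q x = (p x && !(x == a))) (hpa : p a = true) :
    ∀ (S : List String), S.Nodup → a ∈ S →
    (S.filter q).length + 1 = (S.filter p).length := by
  intro S
  induction S with
  | nil => intro _ h; simp at h
  | cons b S ih =>
      intro hnd hmem
      have hnd' := hnd.of_cons
      have hbS : b ∉ S := (List.nodup_cons.mp hnd).1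
      rcases List.mem_cons.mp hmem with rfl | haS
      · have : ∀ x ∈ S, q x = p x := by
          intro x hx
          have hxa : x ≠ a := fun h => hbS (h ▸ hx)
          simp [hq, hxa]
        have hqa : q a = false := by simp [hq]
        rw [List.filter_cons, List.filter_cons, List.filter_congr this, hqa, hpa]
        simp
      · have hab : b ≠ a := fun h => hbS (h ▸ haS)
        have hqb : q b = p b := by simp [hq, hab]
        rw [List.filter_cons, List.filter_cons, hqb]
        by_cases hpb : p b = true <;> simp [hpb, ih hnd' haS]

theorem pv_undisc_insert (graph : List (String × List String)) (dist : PySem.Dict String Int)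
    (a : String) (v : Int) (ha : a ∈ graph.flatMap (fun kv => kv.2))
    (hf : dist.contains a = false) :
    pvUndisc graph (dist.insert a v) + 1 = pvUndisc graph dist := by
  unfold pvUndisc
  refine pv_filter_drop _ _ a ?_ (by simp [hf]) (pvCands graph)
    (PySem.Set.nodup_ofList _) ((PySem.Set.mem_ofList _ _).mpr ha)
  intro x
  rw [PySem.Dict.contains_insert]
  by_cases hx : x = a <;> simp [hx, hf, Bool.and_comm]

theorem pv_undisc_fold (graph : List (String × List String)) (v : Int) :
    ∀ (app : List String) (dist : PySem.Dict String Int), app.Nodup →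
    (∀ x ∈ app, dist.contains x = false) →
    (∀ x ∈ app, x ∈ graph.flatMap (fun kv => kv.2)) →
    pvUndisc graph (app.foldl (fun D x => D.insert x v) dist) + app.length =
      pvUndisc graph dist := by
  intro app
  induction app with
  | nil => intro dist _ _ _; simp
  | cons a app ih =>
      intro dist hnd hf hc
      have hstep := pv_undisc_insert graph dist a v (hc a (by simp)) (hf a (by simp))
      have hrest := ih (dist.insert a v) hnd.of_cons
        (by
          intro x hx
          rw [PySem.Dict.contains_insert]
          have hxa : x ≠ a := fun h => (List.nodup_cons.mp hnd).1 (h ▸ hx)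
          simp [hxa, hf x (by simp [hx])])
        (fun x hx => hc x (by simp [hx]))
      simp only [List.foldl_cons, List.length_cons]
      omega

-- set-length bound for the initial fuel
theorem pv_add_len (s : PySem.Set String) (a : String) :
    (PySem.Set.add s a).length ≤ s.length + 1 := by
  unfold PySem.Set.add; split <;> simp
theorem pv_ofList_len_aux (xs : List String) : ∀ (acc : PySem.Set String),
    (xs.foldl PySem.Set.add acc).length ≤ acc.length + xs.length := by
  induction xs with
  | nil => intro acc; simp
  | cons x xs ih =>
      intro acc
      simp only [List.foldl_cons, List.length_cons]
      have := ih (PySem.Set.add acc x)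
      have := pv_add_len acc x
      omega
theorem pv_ofList_len (xs : List String) : (PySem.Set.ofList xs).length ≤ xs.length := by
  simpa [PySem.Set.ofList_eq_foldl] using pv_ofList_len_aux xs []

-- ===== the per-node lemma: A's relax-or-skip fold vs B's mark-once fold =====
theorem pvNode (node : String) (dn : Int) :
    ∀ (ps : List String) (dist : PySem.Dict String Int) (acc : List String)
      (V : PySem.Set String) (nxt : List String),
      dist.get? node = some dn →
      (∀ p ∈ dist.items, p.2 ≤ dn + 1) →
      (∀ x, PySem.Set.contains V x = dist.contains x) →
      ∃ app : List String,
        ps.foldl (pvStepA node) (dist, acc) =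
          (app.foldl (fun D x => D.insert x (dn + 1)) dist, acc ++ app) ∧
        ps.foldl pvStepC (V, nxt) = (app.foldl PySem.Set.add V, nxt ++ app) ∧
        app.Nodup ∧ (∀ x ∈ app, dist.contains x = false) ∧ (∀ x ∈ app, x ∈ ps) := by
  intro ps
  induction ps with
  | nil =>
      intro dist acc V nxt _ _ _
      exact ⟨[], by simp, by simp, by simp, by simp, by simp⟩
  | cons p ps ih =>
      intro dist acc V nxt hnode hall hV
      by_cases hp : dist.contains p = true
      · -- already discovered: both sides skip
        obtain ⟨prev, hprev⟩ : ∃ prev, dist.get? p = some prev := by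
          rw [PySem.Dict.contains_eq_isSome_get?] at hp
          exact Option.isSome_iff_exists.mp hp
        have hle : prev ≤ dn + 1 :=
          hall (p, prev) (PySem.Dict.mem_items_of_get?_eq_some _ hprev)
        have hA : pvStepA node (dist, acc) p = (dist, acc) := by
          simp [pvStepA, hprev, hnode, hle]
        have hB : pvStepC (V, nxt) p = (V, nxt) := by
          simp only [pvStepC, hV p, hp]; simp
        obtain ⟨app, h1, h2, h3, h4, h5⟩ := ih dist acc V nxt hnode hall hV
        exact ⟨app, by simpa [hA] using h1, by simpa [hB] using h2, h3, h4,
          fun x hx => by simp [h5 x hx]⟩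
      · -- fresh: both sides record p
        have hp' : dist.contains p = false := by simpa using hp
        have hnone : dist.get? p = none := by
          rw [PySem.Dict.contains_eq_isSome_get?] at hp'
          exact Option.not_isSome_iff_eq_none.mp (by simp [hp'])
        have hne : node ≠ p := by
          intro h; rw [← h, hnode] at hnone; simp at hnone
        have hA : pvStepA node (dist, acc) p
            = (dist.insert p (dn + 1), acc ++ [p]) := by
          simp [pvStepA, hnone, hnode]
        have hB : pvStepC (V, nxt) p = (PySem.Set.add V p, nxt ++ [p]) := by
          simp only [pvStepC, hV p, hp']; simp
        have hnode' : (dist.insert p (dn + 1)).get? node = some dn := by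
          rw [PySem.Dict.get?_insert, if_neg hne]; exact hnode
        have hall' : ∀ q ∈ (dist.insert p (dn + 1)).items, q.2 ≤ dn + 1 := by
          intro q hq
          rcases (PySem.Dict.mem_items_insert _ _ _ _).mp hq with h | ⟨h, _⟩
          · simp [h]
          · exact hall _ h
        have hV' : ∀ x, PySem.Set.contains (PySem.Set.add V p) x
            = (dist.insert p (dn + 1)).contains x := by
          intro x
          rw [pv_contains_add, PySem.Dict.contains_insert, hV]
          exact Bool.or_comm _ _
        obtain ⟨app, h1, h2, h3, h4, h5⟩ :=
          ih (dist.insert p (dn + 1)) (acc ++ [p]) (PySem.Set.add V p) (nxt ++ [p])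
            hnode' hall' hV'
        refine ⟨p :: app, ?_, ?_, ?_, ?_, ?_⟩
        · simpa [hA] using h1
        · simpa [hB] using h2
        · refine List.nodup_cons.mpr ⟨?_, h3⟩
          intro hmem
          have := h4 p hmem
          rw [PySem.Dict.contains_insert] at this
          simp at this
        · intro x hx
          rcases List.mem_cons.mp hx with rfl | hx
          · exact hp'
          · have := h4 x hx
            rw [PySem.Dict.contains_insert] at this
            exact (Bool.or_eq_false_iff.mp this).2
        · intro x hx
          rcases List.mem_cons.mp hx with rfl | hx
          · simp
          · simp [h5 x hx]

-- ===== the per-level lemma: A consumes a whole level; B expands it in one pass =====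
theorem pvLevel (graph : List (String × List String)) (d : Int) :
    ∀ (q1 : List String) (f : Nat) (dist : PySem.Dict String Int) (q2 : List String)
      (V : PySem.Set String) (nxt : List String),
      (∀ x ∈ q1, dist.get? x = some d) →
      (∀ p ∈ dist.items, p.2 ≤ d + 1) →
      (∀ x, PySem.Set.contains V x = dist.contains x) →
      ∃ app : List String,
        q1.foldl (pvLevelStep graph) (V, nxt) = (app.foldl PySem.Set.add V, nxt ++ app) ∧
        pvALoop graph (q1.length + f) dist (q1 ++ q2) =
          pvALoop graph f (app.foldl (fun D x => D.insert x (d + 1)) dist) (q2 ++ app) ∧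
        app.Nodup ∧ (∀ x ∈ app, dist.contains x = false) ∧
        (∀ x ∈ app, x ∈ graph.flatMap (fun kv => kv.2)) := by
  intro q1
  induction q1 with
  | nil =>
      intro f dist q2 V nxt _ _ _
      exact ⟨[], by simp, by simp, by simp, by simp, by simp⟩
  | cons n q1 ih =>
      intro f dist q2 V nxt hq1 hall hV
      have hn : dist.get? n = some d := hq1 n (by simp)
      obtain ⟨app1, hA1, hB1, hnd1, hf1, hm1⟩ :=
        pvNode n d (PySem.List.sorted (pvAdj graph n) (fun x => x) false) dist (q1 ++ q2)
          V nxt hn hall hV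
      set D1 := app1.foldl (fun D x => D.insert x (d + 1)) dist with hD1
      have hfresh1 : ∀ a ∈ app1, dist.contains a = false := hf1
      have hitems1 : D1.items = dist.items ++ app1.map (fun a => (a, d + 1)) := by
        simpa using PySem.Dict.items_foldl_insert_fresh app1 (fun a => a)
          (fun _ => d + 1) dist hfresh1 (by simpa using hnd1)
      have hsub1 : ∀ x ∈ app1, x ∈ graph.flatMap (fun kv => kv.2) := by
        intro x hx
        exact pv_adj_sub graph n x ((PySem.List.sorted_perm _ _ _).mem_iff.mp (hm1 x hx))
      obtain ⟨app2, hC2, hA2, hnd2, hf2, hs2⟩ :=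
        ih f D1 (q2 ++ app1) (app1.foldl PySem.Set.add V) (nxt ++ app1)
          (by
            intro x hx
            rw [hD1, pv_get?_foldl_insert]
            have hxc : dist.contains x = true := by
              rw [PySem.Dict.contains_eq_isSome_get?, hq1 x (by simp [hx])]; rfl
            have : x ∉ app1 := fun h => by rw [hfresh1 x h] at hxc; simp at hxc
            simp [this, hq1 x (by simp [hx])])
          (by
            intro p hp
            rw [hitems1] at hp
            rcases List.mem_append.mp hp with h | h
            · exact hall p h
            · obtain ⟨a, _, rfl⟩ := List.mem_map.mp h
              simp)
          (by
            intro x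
            rw [pv_contains_foldl_add, hD1, pv_contains_foldl_insert, hV])
      refine ⟨app1 ++ app2, ?_, ?_, ?_, ?_, ?_⟩
      · rw [List.foldl_cons]
        show q1.foldl (pvLevelStep graph) (pvLevelStep graph (V, nxt) n) = _
        rw [pvLevelStep, hB1, hC2, List.foldl_append, List.append_assoc]
      · have : (n :: q1).length + f = ((q1.length + f)) + 1 := by simp; omega
        rw [this]
        show pvALoop graph ((q1.length + f) + 1) dist (n :: (q1 ++ q2)) = _
        rw [pvALoop]
        simp only [hA1]
        have hq : (q1 ++ q2) ++ app1 = q1 ++ (q2 ++ app1) := List.append_assoc _ _ _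
        rw [hq, hA2, List.foldl_append, List.append_assoc]
      · rw [List.nodup_append]
        refine ⟨hnd1, hnd2, ?_⟩
        intro x hx1 y hy2 hxy
        subst hxy
        have := hf2 x hy2
        rw [hD1, pv_contains_foldl_insert] at this
        simp [hx1] at this
      · intro x hx
        rcases List.mem_append.mp hx with h | h
        · exact hf1 x h
        · have := hf2 x h
          rw [hD1, pv_contains_foldl_insert] at this
          exact (Bool.or_eq_false_iff.mp this).2
      · intro x hx
        rcases List.mem_append.mp hx with h | h
        · exact hsub1 x h
        · exact hs2 x h

-- ===== the main lemma: A's whole run equals B's levels inserted into the running dict =====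
theorem pvMain (graph : List (String × List String)) :
    ∀ (U fA fB : Nat) (d : Int) (dist : PySem.Dict String Int) (V : PySem.Set String)
      (frontier : List String),
      (∀ x ∈ frontier, dist.get? x = some d) →
      (∀ p ∈ dist.items, p.2 ≤ d) →
      (∀ x, PySem.Set.contains V x = dist.contains x) →
      dist.keys.Nodup →
      pvUndisc graph dist ≤ U →
      frontier.length + U + 1 ≤ fA → U + 1 ≤ fB →
      pvALoop graph fA dist frontier = insLevels (pvBLevels graph fB V frontier) d dist := by
  intro U
  induction U using Nat.strong_induction_on with
  | _ U ih =>
    intro fA fB d dist V frontier hfr hall hV hnd hU hfA hfB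
    match frontier, fA, fB with
    | [], fA + 1, fB + 1 => rw [pvBLevels]; rfl
    | n :: q, fA, fB + 1 =>
      have hlen : (n :: q).length ≤ fA := by omega
      obtain ⟨fA', hfA'⟩ : ∃ fA', fA = (n :: q).length + fA' :=
        ⟨fA - (n :: q).length, by omega⟩
      have hall' : ∀ p ∈ dist.items, p.2 ≤ d + 1 := fun p hp => by
        have := hall p hp; omega
      obtain ⟨app, hC, hA, hndapp, hfresh, hsub⟩ :=
        pvLevel graph d (n :: q) fA' dist [] V [] hfr hall' hV
      set D' := app.foldl (fun D x => D.insert x (d + 1)) dist with hD'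
      have hcount : pvUndisc graph D' + app.length = pvUndisc graph dist :=
        pv_undisc_fold graph (d + 1) app dist hndapp hfresh hsub
      have hBlev : pvBLevels graph (fB + 1) V (n :: q)
          = (n :: q) :: pvBLevels graph fB (app.foldl PySem.Set.add V) app := by
        rw [pvBLevels]
        simp only [hC, List.nil_append]
      have hreins : (n :: q).foldl (fun D x => D.insert x d) dist = dist :=
        pv_reinsert (n :: q) d dist hnd hfr
      have hA' : pvALoop graph ((n :: q).length + fA') dist (n :: q)
          = pvALoop graph fA' D' ([] ++ app) := by simpa using hA
      rw [hfA', hA', hBlev]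
      show pvALoop graph fA' D' ([] ++ app)
          = insLevels ((n :: q) :: pvBLevels graph fB (app.foldl PySem.Set.add V) app) d dist
      rw [List.nil_append, insLevels, hreins]
      -- properties of D'
      have hitems : D'.items = dist.items ++ app.map (fun a => (a, d + 1)) := by
        simpa using PySem.Dict.items_foldl_insert_fresh app (fun a => a)
          (fun _ => d + 1) dist hfresh (by simpa using hndapp)
      have happD' : ∀ x ∈ app, D'.get? x = some (d + 1) := by
        intro x hx; rw [hD', pv_get?_foldl_insert]; simp [hx]
      have hallD' : ∀ p ∈ D'.items, p.2 ≤ d + 1 := by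
        intro p hp
        rw [hitems] at hp
        rcases List.mem_append.mp hp with h | h
        · have := hall p h; omega
        · obtain ⟨a, _, rfl⟩ := List.mem_map.mp h; simp
      have hVD' : ∀ x, PySem.Set.contains (app.foldl PySem.Set.add V) x = D'.contains x := by
        intro x; rw [pv_contains_foldl_add, hD', pv_contains_foldl_insert, hV]
      have hndD' : D'.keys.Nodup := by
        rw [hD']
        exact PySem.Dict.nodup_keys_foldl_insert app (fun _ _ => d + 1) dist hnd
      match app, hcount, hC, hndapp, hfresh, hsub, hD', hBlev, hitems, happD', hVD' with
      | [], hcount, hC, hndapp, hfresh, hsub, hD', hBlev, hitems, happD', hVD' =>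
          rw [pvBLevels_nil, insLevels]
          obtain ⟨fA'', rfl⟩ : ∃ fA'', fA' = fA'' + 1 := ⟨fA' - 1, by omega⟩
          rw [hD']
          simp [pvALoop]
      | a :: app', hcount, hC, hndapp, hfresh, hsub, hD', hBlev, hitems, happD', hVD' =>
          have hlen1 : 1 ≤ (a :: app').length := by simp
          have hUdist : (a :: app').length ≤ pvUndisc graph dist := by omega
          have hm : pvUndisc graph dist - (a :: app').length < U := by omega
          have hIH := ih (pvUndisc graph dist - (a :: app').length) hm fA' fB (d + 1) D'
            (((a :: app').foldl PySem.Set.add V)) (a :: app')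
            happD' hallD' hVD' hndD' (by omega) (by omega) (by omega)
          refine hIH.trans ?_
          obtain ⟨fB'', rfl⟩ : ∃ fB'', fB = fB'' + 1 := ⟨fB - 1, by omega⟩
          rw [pvBLevels]
          simp only [insLevels]
          congr 1
          rw [pv_reinsert _ _ _ hndD' happD']
          exact hD'

-- ===== VERDICT (by name: the statement is the Claim_ definition above) =====
theorem ancestor_distances_py_spec : Claim_equal_ancestor_distances_py := by
  intro graph start _
  unfold Spec_ancestor_distances_py ancestor_distances_py ancestor_distances_py_alt
  rw [pv_enum_fold]
  set dist0 : PySem.Dict String Int := PySem.Dict.empty.insert start 0 with hdist0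
  have hitems0 : dist0.items = [(start, 0)] := by
    rw [hdist0, PySem.Dict.items_insert_of_not_contains _ _ (by simp)]
    rfl
  have hget0 : dist0.get? start = some 0 := PySem.Dict.get?_insert_self _ _ _
  have hnd0 : dist0.keys.Nodup :=
    PySem.Dict.nodup_keys_insert _ _ _ PySem.Dict.nodup_keys_empty
  have hV0 : ∀ x, PySem.Set.contains (PySem.Set.ofList [start]) x = dist0.contains x := by
    intro x
    rw [hdist0, PySem.Dict.contains_insert]
    show PySem.Set.contains (PySem.Set.add PySem.Set.empty start) x = _
    rw [pv_contains_add]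
    simp [PySem.Set.contains, PySem.Set.empty]
  have hUb : pvUndisc graph dist0 ≤ (graph.map (fun kv => kv.2.length)).sum := by
    calc pvUndisc graph dist0 ≤ (pvCands graph).length := List.length_filter_le _ _
    _ ≤ (graph.flatMap (fun kv => kv.2)).length := pv_ofList_len _
    _ = (graph.map (fun kv => kv.2.length)).sum := by
        rw [List.length_flatMap]
  have hmain := pvMain graph (pvUndisc graph dist0) (pvFuel graph) (pvFuel graph) 0 dist0
    (PySem.Set.ofList [start]) [start]
    (by intro x hx; rw [List.mem_singleton] at hx; subst hx; exact hget0)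
    (by intro p hp; rw [hitems0] at hp; simp_all)
    hV0 hnd0 le_rfl
    (by unfold pvFuel; simp; omega) (by unfold pvFuel; omega)
  rw [hmain]
  -- both insLevels runs agree: the first level is [start], carried at 0 on each side
  obtain ⟨m, hm⟩ : ∃ m, pvFuel graph = m + 1 := ⟨pvFuel graph - 1, by unfold pvFuel; omega⟩
  rw [hm]
  rw [show pvBLevels graph (m + 1) (PySem.Set.ofList [start]) [start]
      = [start] :: pvBLevels graph m
          ((PySem.Set.ofList [start]).foldl (pvLevelStep graph) (PySem.Set.ofList [start], ([] : List String)) |>.1)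
          (([start].foldl (pvLevelStep graph) (PySem.Set.ofList [start], ([] : List String))).2) from rfl]
  rw [insLevels, insLevels]
  have hsame : List.foldl (fun D x => D.insert x 0) PySem.Dict.empty [start]
      = List.foldl (fun D x => D.insert x 0) dist0 [start] := by
    simp only [List.foldl_cons, List.foldl_nil]
    rw [hdist0, PySem.Dict.insert_insert_self]
  rw [hsame]
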